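-- pv_equiv track=rewrite | github.com/robsdedude/flake8-picky-parentheses | flake8_redundant_parentheses/__init__.py | _first_in_line
-- ===== SOURCE A (Python) =====
-- def _first_in_line(cords, source_code):
--     for symb in source_code[cords[0] - 1]:
--         if symb == " " or symb == "\t":
--             continue
--         elif symb == ")" or symb == "(" or symb == "]" or symb == "[" or symb == "}" or symb == "{":
--             return True
--         else:
--             return False
-- ===== SOURCE B (Python) =====
-- _VERDICT = {"(": True, ")": True, "[": True, "]": True, "{": True, "}": True}
--
--
-- def _first_in_line(cords, source_code):
--     line = source_code[cords[0] - 1]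
--
--     def verdict_from(i):
--         if i >= len(line):
--             return None
--         if line[i] in " \t":
--             return verdict_from(i + 1)
--         return _VERDICT.get(line[i], False)
--
--     return verdict_from(0)
-- ===== Notes on version B (the rewrite author's own statement) =====
-- stated objective: alternative
-- what changed: Replaces A's iterative for-loop with its six-way elif chain by a recursive index scanner whose verdict comes from a precomputed dict table (bracket -> True, default False), returning None past the end of the line.
import Mathlib
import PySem

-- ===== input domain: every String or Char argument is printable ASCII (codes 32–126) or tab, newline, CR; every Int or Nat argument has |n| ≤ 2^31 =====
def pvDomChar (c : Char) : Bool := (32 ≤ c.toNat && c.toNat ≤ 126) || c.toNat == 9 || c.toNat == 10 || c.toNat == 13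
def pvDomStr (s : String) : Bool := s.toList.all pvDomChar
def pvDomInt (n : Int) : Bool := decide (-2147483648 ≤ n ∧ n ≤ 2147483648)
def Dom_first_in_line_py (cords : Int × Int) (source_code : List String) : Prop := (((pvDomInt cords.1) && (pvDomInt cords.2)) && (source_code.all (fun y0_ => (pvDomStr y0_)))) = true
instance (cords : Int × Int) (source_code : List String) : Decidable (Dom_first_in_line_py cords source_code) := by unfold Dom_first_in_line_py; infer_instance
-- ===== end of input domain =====

-- B replaces A's for-loop with a six-way elif chain by a recursive index scanner with a dict verdict table (objective: alternative).

-- ===== PORT A =====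
-- the for-loop over the line's characters, branch order as in A
def firstInLineLoopA : List Char → Option Bool
  | [] => none
  | symb :: rest =>
    if symb == ' ' || symb == '\t' then firstInLineLoopA rest
    else if symb == ')' || symb == '(' || symb == ']' || symb == '[' || symb == '}' || symb == '{' then some true
    else some false

def first_in_line_py (cords : Int × Int) (source_code : List String) : Option Bool :=
  match PySem.List.pyGet? source_code (cords.1 - 1) with
  | none => none  -- IndexError; excluded by Pre_
  | some line => firstInLineLoopA line.toList

-- ===== PORT B =====
-- the module-level dict _VERDICT
def verdictTable : PySem.Dict Char Bool :=
  PySem.Dict.ofList [('(', true), (')', true), ('[', true), (']', true), ('{', true), ('}', true)]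

-- the recursive helper verdict_from(i); recursion on index i is transcribed as
-- recursion on the suffix line[i:] (i ↔ drop i), same tests in the same order
def verdictFrom : List Char → Option Bool
  | [] => none
  | c :: rest =>
    if (" \t".toList).contains c then verdictFrom rest
    else some ((PySem.Dict.get? verdictTable c).getD false)

def first_in_line_py_alt (cords : Int × Int) (source_code : List String) : Option Bool :=
  match PySem.List.pyGet? source_code (cords.1 - 1) with
  | none => none  -- IndexError; excluded by Pre_
  | some line => verdictFrom line.toList

-- ===== PRECONDITION & SPEC =====
-- A raises IndexError when line index cords[0]-1 is out of range (Python negative wraparound allowed)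
def Pre_first_in_line_py (cords : Int × Int) (source_code : List String) : Prop :=
  PySem.Raise.InRange source_code.length (cords.1 - 1)
instance (cords : Int × Int) (source_code : List String) : Decidable (Pre_first_in_line_py cords source_code) := by unfold Pre_first_in_line_py; infer_instance

def pvWitness_first_in_line_py : (Int × Int) × List String := ((1, 0), ["  (x"])

def Spec_first_in_line_py (cords : Int × Int) (source_code : List String) (out : Option Bool) : Prop := out = first_in_line_py_alt cords source_code
instance (cords : Int × Int) (source_code : List String) (out : Option Bool) : Decidable (Spec_first_in_line_py cords source_code out) := by unfold Spec_first_in_line_py; infer_instance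

-- ===== CLAIM (what is proved, stated in full; the proofs are below) =====
def Claim_equal_first_in_line_py : Prop := ∀ (cords : Int × Int) (source_code : List String), Dom_first_in_line_py cords source_code → Pre_first_in_line_py cords source_code → Spec_first_in_line_py cords source_code (first_in_line_py cords source_code)

-- ===== LEMMAS AND PROOFS =====
lemma loopA_eq_verdictFrom (cs : List Char) : firstInLineLoopA cs = verdictFrom cs := by
  induction cs with
  | nil => rfl
  | cons c rest ih =>
    by_cases hw : (c == ' ' || c == '\t') = true
    · rcases Bool.or_eq_true_iff.mp hw with h | h <;>
        · have hc := beq_iff_eq.mp h; subst hc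
          simp [firstInLineLoopA, verdictFrom, ih]
    · have hw' : ((" \t".toList).contains c) = false := by
        simp only [Bool.or_eq_true, beq_iff_eq] at hw
        push Not at hw
        have : (" \t".toList) = [' ', '\t'] := by decide
        simp [this, hw.1, hw.2]
      simp only [firstInLineLoopA, verdictFrom, hw, hw', Bool.false_eq_true, if_false]
      by_cases hb : c ∈ ['(', ')', '[', ']', '{', '}']
      · fin_cases hb <;> decide
      · simp only [List.mem_cons, List.not_mem_nil, or_false] at hb
        push Not at hb
        obtain ⟨n1, n2, n3, n4, n5, n6⟩ := hb
        have hA : (c == ')' || c == '(' || c == ']' || c == '[' || c == '}' || c == '{') = false := by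
          simp [n1, n2, n3, n4, n5, n6]
        have htab : verdictTable =
            PySem.Dict.mk [('(', true), (')', true), ('[', true), (']', true), ('{', true), ('}', true)] := by
          decide
        have hget : verdictTable.get? c = none := by
          rw [htab]
          simp [beq_iff_eq, Ne.symm n1, Ne.symm n2, Ne.symm n3,
                Ne.symm n4, Ne.symm n5, Ne.symm n6, PySem.Dict.get?]
        simp [hA, hget]

-- ===== VERDICT (by name: the statement is the Claim_ definition above) =====
theorem first_in_line_py_spec : Claim_equal_first_in_line_py := by
  intro cords source_code _ _
  unfold Spec_first_in_line_py first_in_line_py first_in_line_py_alt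
  cases PySem.List.pyGet? source_code (cords.1 - 1) with
  | none => rfl
  | some line => exact loopA_eq_verdictFrom line.toList
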